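-- pv_equiv track=rewrite | github.com/pingcap/tidb-insight | explorer/tui.py | format_columns
-- ===== SOURCE A (Python) =====
-- def format_columns(data):
--     result = []
--     col_width = []
--     for row in data:
--         i = 0
--         for word in row:
--             try:
--                 col_width[i] = max(len(word), col_width[i])
--             except IndexError:
--                 col_width.append(len(word))
--             i += 1
--     for row in data:
--         i = 0
--         wide_row = []
--         for word in row:
--             wide_row.append(word.ljust(col_width[i] + 2))
--             i += 1
--         result.append("".join(wide_row))
--     return result
-- ===== SOURCE B (Python) =====
-- def format_columns(data):
--     ncols = max((len(row) for row in data), default=0)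
--     widths = [max(len(row[c]) for row in data if c < len(row)) for c in range(ncols)]
--     return ["".join(w.ljust(widths[i] + 2) for i, w in enumerate(row)) for row in data]
-- ===== Notes on version B (the rewrite author's own statement) =====
-- stated objective: idiomatic
-- what changed: Column widths are computed column-major (per-column max over a range of column indices) and the output is built with comprehensions, instead of A's row-major try/except incremental growth of the width list.
import Mathlib
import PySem

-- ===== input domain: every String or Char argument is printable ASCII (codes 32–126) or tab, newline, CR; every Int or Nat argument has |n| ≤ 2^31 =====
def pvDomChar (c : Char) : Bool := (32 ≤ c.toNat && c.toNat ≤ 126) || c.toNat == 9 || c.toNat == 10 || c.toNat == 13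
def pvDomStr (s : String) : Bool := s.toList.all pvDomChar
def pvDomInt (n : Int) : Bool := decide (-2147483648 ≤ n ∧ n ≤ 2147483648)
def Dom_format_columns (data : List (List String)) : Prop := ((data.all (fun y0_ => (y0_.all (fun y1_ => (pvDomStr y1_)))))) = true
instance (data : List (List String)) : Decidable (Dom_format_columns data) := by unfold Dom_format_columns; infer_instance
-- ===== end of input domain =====

-- B pads by column widths computed column-major with comprehensions instead of A's
-- row-major try/except incremental growth of the width list (objective: idiomatic).

-- word.ljust(w): pad on the right with spaces to width w (unchanged if already longer); exact on ASCII
def pvLjust (s : String) (w : Nat) : List Char :=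
  s.toList ++ List.replicate (w - s.toList.length) ' '

-- ===== PORT A =====
-- the inner width loop of A: walk the row and the current col_width list in lockstep
-- (index i walks both; 'except IndexError' appends when col_width runs out)
def pvRowUpd : List String → List Nat → List Nat
  | [], ws => ws
  | w :: r, [] => w.toList.length :: pvRowUpd r []
  | w :: r, v :: vs => Nat.max w.toList.length v :: pvRowUpd r vs

-- the second loop of A: col_width[i] is always in range, read via headD/tail in lockstep
def pvRowOutA : List String → List Nat → List Char
  | [], _ => []
  | w :: r, ws => pvLjust w (ws.headD 0 + 2) ++ pvRowOutA r ws.tail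

def format_columns (data : List (List String)) : List String :=
  let colWidth := data.foldl (fun ws row => pvRowUpd row ws) []
  data.map (fun row => String.mk (pvRowOutA row colWidth))

-- ===== PORT B =====
-- max(len(row[c]) for row in data if c < len(row)); the generator is never empty for c < ncols
def pvColWidthB (data : List (List String)) (c : Nat) : Nat :=
  ((data.filterMap (fun row => row[c]?)).map (fun w => w.toList.length)).foldl Nat.max 0

def format_columns_alt (data : List (List String)) : List String :=
  let ncols := data.foldl (fun m row => Nat.max m row.length) 0
  let widths := (List.range ncols).map (pvColWidthB data)
  data.map (fun row =>
    String.mk ((row.zipIdx.map (fun p => pvLjust p.1 (widths.getD p.2 0 + 2))).flatten))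

-- ===== PRECONDITION & SPEC =====
def Spec_format_columns (data : List (List String)) (out : List String) : Prop := out = format_columns_alt data
instance (data : List (List String)) (out : List String) : Decidable (Spec_format_columns data out) := by unfold Spec_format_columns; infer_instance

-- ===== CLAIM (what is proved, stated in full; the proofs are below) =====
def Claim_equal_format_columns : Prop := ∀ (data : List (List String)), Dom_format_columns data → Spec_format_columns data (format_columns data)

-- ===== LEMMAS AND PROOFS =====

-- the lengths occurring in column c, in row order
def pvColList (data : List (List String)) (c : Nat) : List Nat :=
  (data.filterMap (fun row => row[c]?)).map (fun w => w.toList.length)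

def pvOMax (o : Option Nat) (n : Nat) : Option Nat :=
  some (match o with | none => n | some v => Nat.max n v)

theorem pvRowUpd_getElem? (row : List String) (ws : List Nat) (c : Nat) :
    (pvRowUpd row ws)[c]? =
      match row[c]? with
      | none => ws[c]?
      | some w => pvOMax ws[c]? w.toList.length := by
  induction row generalizing ws c with
  | nil => simp [pvRowUpd]
  | cons w r ih =>
    cases ws with
    | nil =>
      cases c with
      | zero => simp [pvRowUpd, pvOMax]
      | succ c => simpa [pvRowUpd] using ih [] c
    | cons v vs =>
      cases c with
      | zero => simp [pvRowUpd, pvOMax]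
      | succ c => simpa [pvRowUpd] using ih vs c

theorem pvFold_getElem? (data : List (List String)) (ws : List Nat) (c : Nat) :
    (data.foldl (fun ws row => pvRowUpd row ws) ws)[c]? =
      (pvColList data c).foldl pvOMax ws[c]? := by
  induction data generalizing ws with
  | nil => simp [pvColList]
  | cons row t ih =>
    simp only [List.foldl_cons]
    rw [ih, pvRowUpd_getElem?]
    cases h : row[c]? with
    | none => simp [pvColList, h]
    | some w => simp [pvColList, h]

theorem pvFoldOMax_some (L : List Nat) (v : Nat) :
    L.foldl pvOMax (some v) = some (L.foldl Nat.max v) := by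
  induction L generalizing v with
  | nil => rfl
  | cons a t ih => simp [pvOMax, ih, Nat.max_comm]

theorem pvFoldOMax_none_cons (a : Nat) (t : List Nat) :
    (a :: t).foldl pvOMax none = some ((a :: t).foldl Nat.max 0) := by
  simp [pvOMax, pvFoldOMax_some]

theorem pvColList_ne_nil {data : List (List String)} {row : List String} {c : Nat}
    (hmem : row ∈ data) (hc : c < row.length) : pvColList data c ≠ [] := by
  intro h
  have h2 : (data.filterMap (fun row => row[c]?)) = [] := by
    simpa [pvColList] using h
  have := (List.filterMap_eq_nil_iff.mp h2) row hmem
  simp [List.getElem?_eq_getElem hc] at this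

theorem pvColWidths_getElem? {data : List (List String)} {row : List String} {c : Nat}
    (hmem : row ∈ data) (hc : c < row.length) :
    (data.foldl (fun ws row => pvRowUpd row ws) [])[c]? = some (pvColWidthB data c) := by
  rw [pvFold_getElem?]
  cases hL : pvColList data c with
  | nil => exact absurd hL (pvColList_ne_nil hmem hc)
  | cons a t =>
    have : pvColWidthB data c = (pvColList data c).foldl Nat.max 0 := rfl
    rw [this, hL]
    simpa using pvFoldOMax_none_cons a t

theorem pv_le_foldl_max (l : List (List String)) (m : Nat) :
    m ≤ l.foldl (fun m row => Nat.max m row.length) m := by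
  induction l generalizing m with
  | nil => simp
  | cons r t ih =>
    simp only [List.foldl_cons]
    exact le_trans (Nat.le_max_left m r.length) (ih _)

theorem pv_mem_le_foldl_max {l : List (List String)} {row : List String}
    (hmem : row ∈ l) (m : Nat) :
    row.length ≤ l.foldl (fun m row => Nat.max m row.length) m := by
  induction l generalizing m with
  | nil => cases hmem
  | cons r t ih =>
    simp only [List.foldl_cons]
    rcases List.mem_cons.mp hmem with h | h
    · subst h; exact le_trans (Nat.le_max_right m row.length) (pv_le_foldl_max t _)
    · exact ih h _

theorem pvRowOut_eq (row : List String) (ws widths : List Nat) (n : Nat)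
    (h : ∀ i, i < row.length → ws[i]? = widths[n + i]?) :
    pvRowOutA row ws =
      ((row.zipIdx n).map (fun p => pvLjust p.1 (widths.getD p.2 0 + 2))).flatten := by
  induction row generalizing ws n with
  | nil => simp [pvRowOutA]
  | cons w r ih =>
    have h0 : ws[0]? = widths[n]? := by simpa using h 0 (by simp)
    cases ws with
    | nil =>
      cases hw : widths[n]? with
      | none =>
        have ht : ∀ i, i < r.length → ([] : List Nat)[i]? = widths[(n+1) + i]? := by
          intro i hi
          have hlen : widths.length ≤ n := by
            by_contra hcon
            simp [List.getElem?_eq_getElem (Nat.lt_of_not_le hcon)] at hw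
          simp [List.getElem?_eq_none (by omega : widths.length ≤ (n+1)+i)]
        simp [pvRowOutA, List.zipIdx_cons, hw, ih [] (n+1) ht]
      | some v => simp [hw] at h0
    | cons v vs =>
      have hv : widths[n]? = some v := by simpa using h0.symm
      have ht : ∀ i, i < r.length → vs[i]? = widths[(n+1) + i]? := by
        intro i hi
        have := h (i+1) (by simpa using Nat.succ_lt_succ hi)
        simpa [Nat.add_comm, Nat.add_assoc, Nat.add_left_comm] using this
      simp [pvRowOutA, List.zipIdx_cons, hv, ih vs (n+1) ht]

-- ===== VERDICT (by name: the statement is the Claim_ definition above) =====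
theorem format_columns_spec : Claim_equal_format_columns := by
  intro data _
  unfold Spec_format_columns format_columns format_columns_alt
  simp only []
  apply List.map_congr_left
  intro row hmem
  congr 1
  apply pvRowOut_eq row _ _ 0
  intro i hi
  rw [pvColWidths_getElem? hmem hi]
  have hn : i < data.foldl (fun m row => Nat.max m row.length) 0 :=
    Nat.lt_of_lt_of_le hi (pv_mem_le_foldl_max hmem 0)
  simp [hn]
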